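-- pv_equiv track=rewrite | github.com/Favo02/advent-of-code | 2023/day11/day11_original.py | dists
-- ===== SOURCE A (Python) =====
-- def man_dist(g1, g2):
--   x1, y1 = g1
--   x2, y2 = g2
--   return abs(x1 - x2) + abs(y1 - y2)
--
-- def dists(galaxs):
--   dists = {}
--
--   for g1 in galaxs:
--     for g2 in galaxs:
--       if g1 == g2: continue
--       d = man_dist(g1, g2)
--       if (g1,g2) not in dists:
--         dists[(g1,g2)] = d
--         dists[(g2,g1)] = d
--       else:
--         dists[(g1,g2)] = max(dists[(g1,g2)], d)
--         dists[(g2,g1)] = max(dists[(g2,g1)], d)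
--
--   return dists
-- ===== SOURCE B (Python) =====
-- def dists(galaxs):
--   res = {}
--   for i, a in enumerate(galaxs):
--     for b in galaxs[i + 1:]:
--       if a != b:
--         m = abs(a[0] - b[0]) + abs(a[1] - b[1])
--         res[(a, b)] = m
--         res[(b, a)] = m
--   return res
-- ===== Notes on version B (the rewrite author's own statement) =====
-- stated objective: simpler
-- what changed: B visits each unordered pair once via a triangular scan (enumerate + tail slice) and writes both orientations directly, eliminating A's full ordered-pair scan, its dict membership test and the dead max-update branch.
import Mathlib
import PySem

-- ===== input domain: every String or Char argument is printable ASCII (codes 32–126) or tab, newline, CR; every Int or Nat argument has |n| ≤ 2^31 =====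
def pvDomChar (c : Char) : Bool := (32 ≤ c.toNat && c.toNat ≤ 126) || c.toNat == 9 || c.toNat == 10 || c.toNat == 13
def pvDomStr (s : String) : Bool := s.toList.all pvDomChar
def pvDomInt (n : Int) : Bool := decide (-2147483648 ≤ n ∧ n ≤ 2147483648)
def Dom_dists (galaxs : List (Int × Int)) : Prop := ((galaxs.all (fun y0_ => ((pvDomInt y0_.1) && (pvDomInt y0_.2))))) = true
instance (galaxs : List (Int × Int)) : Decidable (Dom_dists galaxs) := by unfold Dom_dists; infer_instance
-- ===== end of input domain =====

-- B replaces A's full ordered-pair scan (with its dict membership test and max-update branch)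
-- by a triangular scan that visits each unordered pair once and writes both orientations: simpler, same result.

abbrev GDict := PySem.Dict ((Int × Int) × (Int × Int)) Int

-- ===== PORT A =====
def manDist (g1 g2 : Int × Int) : Int := |g1.1 - g2.1| + |g1.2 - g2.2|

def aStep (g1 : Int × Int) (d : GDict) (g2 : Int × Int) : GDict :=
  if g1 = g2 then d
  else
    let m := manDist g1 g2
    if d.contains (g1, g2) = false then
      (d.insert (g1, g2) m).insert (g2, g1) m
    else
      -- Python reads dists[(g1,g2)] and dists[(g2,g1)] here; in this branch both keys are
      -- always present (inserts come in pairs), so getD _ 0 is exact (no KeyError possible).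
      let d1 := d.insert (g1, g2) (max (d.getD (g1, g2) 0) m)
      d1.insert (g2, g1) (max (d1.getD (g2, g1) 0) m)

def dists (galaxs : List (Int × Int)) : List ((Int × Int) × (Int × Int) × Int) :=
  ((galaxs.foldl (fun d g1 => galaxs.foldl (aStep g1) d) PySem.Dict.empty).items.map
    (fun p => (p.1.1, p.1.2, p.2)))

-- ===== PORT B =====
def bStep (a : Int × Int) (d : GDict) (b : Int × Int) : GDict :=
  if a = b then d
  else
    let m := |a.1 - b.1| + |a.2 - b.2|
    (d.insert (a, b) m).insert (b, a) m

-- 'for i, a in enumerate(galaxs): for b in galaxs[i+1:]' = structural recursion pairing the head with the tail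
def distsAltAux : List (Int × Int) → GDict → GDict
  | [], d => d
  | a :: rest, d => distsAltAux rest (rest.foldl (bStep a) d)

def dists_alt (galaxs : List (Int × Int)) : List ((Int × Int) × (Int × Int) × Int) :=
  ((distsAltAux galaxs PySem.Dict.empty).items.map (fun p => (p.1.1, p.1.2, p.2)))

-- ===== PRECONDITION & SPEC =====
def Spec_dists (galaxs : List (Int × Int)) (out : List ((Int × Int) × (Int × Int) × Int)) : Prop := out = dists_alt galaxs
instance (galaxs : List (Int × Int)) (out : List ((Int × Int) × (Int × Int) × Int)) : Decidable (Spec_dists galaxs out) := by unfold Spec_dists; infer_instance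

-- ===== CLAIM (what is proved, stated in full; the proofs are below) =====
def Claim_equal_dists : Prop := ∀ (galaxs : List (Int × Int)), Dom_dists galaxs → Spec_dists galaxs (dists galaxs)

-- ===== LEMMAS AND PROOFS =====

-- DInv: invariant of both builds — keys nodup; every entry (a,b) ↦ v has a ≠ b, v = manDist a b, and the mirror entry with the same value
def DInv (d : GDict) : Prop :=
  d.keys.Nodup ∧ ∀ a b v, d.get? (a, b) = some v → a ≠ b ∧ v = manDist a b ∧ d.get? (b, a) = some v

theorem manDist_comm (a b : Int × Int) : manDist a b = manDist b a := by
  simp [manDist, abs_sub_comm]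

theorem insert_same (d : GDict) (k : (Int × Int) × (Int × Int)) (v : Int)
    (hn : d.keys.Nodup) (h : d.get? k = some v) : d.insert k v = d := by
  apply PySem.Dict.ext
  have hc : d.contains k = true := by rw [PySem.Dict.contains_eq_isSome_get?, h]; rfl
  rw [PySem.Dict.items_insert_of_contains _ _ hc]
  conv_rhs => rw [← List.map_id d.items]
  apply List.map_congr_left
  intro p hp
  by_cases hk : p.1 == k
  · have hpk : p.1 = k := by exact eq_of_beq hk
    have hm : (p.1, p.2) ∈ d.items := by simpa using hp
    have : d.get? p.1 = some p.2 := PySem.Dict.get?_of_mem_items _ hm hn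
    rw [hpk] at this; rw [h] at this
    simp [hpk, (Option.some_inj.mp this), Prod.ext_iff]
  · simp [hk]

theorem bStep_inv (a b : Int × Int) (d : GDict) (h : DInv d) : DInv (bStep a d b) := by
  obtain ⟨hn, hi⟩ := h
  unfold bStep
  by_cases hab : a = b
  · simpa [hab] using ⟨hn, hi⟩
  simp only [if_neg hab]
  constructor
  · exact PySem.Dict.nodup_keys_insert _ _ _ (PySem.Dict.nodup_keys_insert _ _ _ hn)
  intro x y v hv
  have hba : (b, a) ≠ (a, b) := fun h' => hab (congrArg Prod.snd h')
  have hab' : (a, b) ≠ (b, a) := fun h' => hab (congrArg Prod.fst h')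
  rw [PySem.Dict.get?_insert, PySem.Dict.get?_insert] at hv
  by_cases h1 : (x, y) = (b, a)
  · rw [if_pos h1] at hv
    obtain ⟨hx, hy⟩ : x = b ∧ y = a := by simpa [Prod.ext_iff] using h1
    subst hx; subst hy
    refine ⟨fun h' => hab h'.symm, ?_, ?_⟩
    · simp only [Option.some_inj] at hv; rw [← hv, manDist_comm]; rfl
    · rw [PySem.Dict.get?_insert, PySem.Dict.get?_insert, if_neg hab', if_pos rfl]
      simpa using hv
  · rw [if_neg h1] at hv
    by_cases h2 : (x, y) = (a, b)
    · rw [if_pos h2] at hv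
      obtain ⟨hx, hy⟩ : x = a ∧ y = b := by simpa [Prod.ext_iff] using h2
      subst hx; subst hy
      refine ⟨hab, ?_, ?_⟩
      · simp only [Option.some_inj] at hv; rw [← hv]; rfl
      · rw [PySem.Dict.get?_insert, if_pos rfl]; simpa using hv
    · rw [if_neg h2] at hv
      obtain ⟨hxy, hval, hmir⟩ := hi x y v hv
      refine ⟨hxy, hval, ?_⟩
      have h3 : (y, x) ≠ (b, a) := by
        intro h'; apply h1
        obtain ⟨hy, hx⟩ : y = b ∧ x = a := by simpa [Prod.ext_iff] using h'
        exact absurd (by simp [hx, hy]) h2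
      have h4 : (y, x) ≠ (a, b) := by
        intro h'; apply h1
        obtain ⟨hy, hx⟩ : y = a ∧ x = b := by simpa [Prod.ext_iff] using h'
        simp [hx, hy]
      rw [PySem.Dict.get?_insert, PySem.Dict.get?_insert, if_neg h3, if_neg h4]
      exact hmir

theorem aStep_eq (g1 g2 : Int × Int) (d : GDict) (h : DInv d) : aStep g1 d g2 = bStep g1 d g2 := by
  obtain ⟨hn, hi⟩ := h
  unfold aStep bStep
  by_cases hab : g1 = g2
  · simp [hab]
  simp only [if_neg hab]
  by_cases hc : d.contains (g1, g2) = false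
  · rw [if_pos hc]; rfl
  rw [if_neg hc]
  have hc' : d.contains (g1, g2) = true := by simpa using hc
  have hs : (d.get? (g1, g2)).isSome := by rw [← PySem.Dict.contains_eq_isSome_get?, hc']
  obtain ⟨v, hv⟩ := Option.isSome_iff_exists.mp hs
  obtain ⟨_, hval, hmir⟩ := hi g1 g2 v hv
  have hne : (g2, g1) ≠ (g1, g2) := fun h' => hab (congrArg Prod.snd h')
  show (let d1 := d.insert (g1, g2) (max (d.getD (g1, g2) 0) (manDist g1 g2));
      d1.insert (g2, g1) (max (d1.getD (g2, g1) 0) (manDist g1 g2)))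
    = (d.insert (g1, g2) (|g1.1 - g2.1| + |g1.2 - g2.2|)).insert (g2, g1) (|g1.1 - g2.1| + |g1.2 - g2.2|)
  have e1 : d.getD (g1, g2) 0 = v := by rw [PySem.Dict.getD_eq_get?_getD, hv]; rfl
  simp only [e1, ← hval, max_self]
  have e2 : (d.insert (g1, g2) v).getD (g2, g1) 0 = v := by
    rw [PySem.Dict.getD_insert, if_neg hne, PySem.Dict.getD_eq_get?_getD, hmir]; rfl
  simp only [e2, max_self]
  rw [hval]; rfl

theorem aStep_skip (g1 g2 : Int × Int) (d : GDict) (h : DInv d)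
    (hc : g1 = g2 ∨ d.contains (g1, g2) = true) : aStep g1 d g2 = d := by
  rw [aStep_eq g1 g2 d h]
  unfold bStep
  rcases hc with hc | hc
  · rw [if_pos hc]
  by_cases hab : g1 = g2
  · rw [if_pos hab]
  rw [if_neg hab]
  have hs : (d.get? (g1, g2)).isSome := by rw [← PySem.Dict.contains_eq_isSome_get?, hc]
  obtain ⟨v, hv⟩ := Option.isSome_iff_exists.mp hs
  obtain ⟨_, hval, hmir⟩ := (h.2) g1 g2 v hv
  have hmv : v = |g1.1 - g2.1| + |g1.2 - g2.2| := hval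
  show (d.insert (g1, g2) (|g1.1 - g2.1| + |g1.2 - g2.2|)).insert (g2, g1) (|g1.1 - g2.1| + |g1.2 - g2.2|) = d
  rw [← hmv, insert_same d _ v h.1 hv, insert_same d _ v h.1 hmir]

theorem contains_bStep (a b : Int × Int) (d : GDict) (k : (Int × Int) × (Int × Int))
    (h : d.contains k = true) : (bStep a d b).contains k = true := by
  unfold bStep
  by_cases hab : a = b
  · simpa [hab] using h
  simp [if_neg hab, PySem.Dict.contains_insert, h]

theorem contains_brow (a : Int × Int) (l : List (Int × Int)) (d : GDict)
    (k : (Int × Int) × (Int × Int)) (h : d.contains k = true) :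
    (l.foldl (bStep a) d).contains k = true := by
  induction l generalizing d with
  | nil => exact h
  | cons c t ih => exact ih _ (contains_bStep a c d k h)

theorem brow_contains_pair (a b : Int × Int) (l : List (Int × Int)) (d : GDict)
    (hb : b ∈ l) (hne : a ≠ b) : (l.foldl (bStep a) d).contains (b, a) = true := by
  induction l generalizing d with
  | nil => simp at hb
  | cons c t ih =>
    rcases List.mem_cons.mp hb with hbc | hbt
    · subst hbc
      rw [List.foldl_cons]
      apply contains_brow
      unfold bStep
      rw [if_neg hne]
      exact PySem.Dict.contains_insert_self _ _ _
    · rw [List.foldl_cons]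
      exact ih _ hbt

theorem brow_inv (a : Int × Int) (l : List (Int × Int)) (d : GDict) (h : DInv d) :
    DInv (l.foldl (bStep a) d) := by
  induction l generalizing d with
  | nil => exact h
  | cons c t ih => exact ih _ (bStep_inv a c d h)

theorem arow_eq_brow (a : Int × Int) (l : List (Int × Int)) (d : GDict) (h : DInv d) :
    l.foldl (aStep a) d = l.foldl (bStep a) d := by
  induction l generalizing d with
  | nil => rfl
  | cons c t ih =>
    simp only [List.foldl_cons, aStep_eq a c d h]
    exact ih _ (bStep_inv a c d h)

theorem arow_prefix_skip (a : Int × Int) (p l : List (Int × Int)) (d : GDict) (h : DInv d)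
    (hp : ∀ b ∈ p, a = b ∨ d.contains (a, b) = true) :
    (p ++ l).foldl (aStep a) d = l.foldl (aStep a) d := by
  induction p with
  | nil => rfl
  | cons c t ih =>
    simp only [List.cons_append, List.foldl_cons,
      aStep_skip a c d h (hp c (List.mem_cons_self))]
    exact ih (fun b hb => hp b (List.mem_cons_of_mem c hb))

-- A's outer loop over l (rows scanning p ++ l) equals B's triangular recursion,
-- given that d already holds every pair linking l to the already-processed prefix p
theorem main_eq (l p : List (Int × Int)) (d : GDict) (h : DInv d)
    (hp : ∀ a b, a ∈ l → b ∈ p → (a = b ∨ d.contains (a, b) = true)) :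
    l.foldl (fun dd g1 => (p ++ l).foldl (aStep g1) dd) d = distsAltAux l d := by
  induction l generalizing p d with
  | nil => rfl
  | cons a rest ih =>
    simp only [List.foldl_cons]
    have h1 : (p ++ a :: rest).foldl (aStep a) d = rest.foldl (bStep a) d := by
      rw [arow_prefix_skip a p (a :: rest) d h
        (fun b hb => hp a b List.mem_cons_self hb)]
      simp only [List.foldl_cons, aStep_skip a a d h (Or.inl rfl)]
      exact arow_eq_brow a rest d h
    rw [h1]
    have hl : p ++ a :: rest = (p ++ [a]) ++ rest := by simp
    have := ih (p ++ [a]) (rest.foldl (bStep a) d) (brow_inv a rest d h) ?_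
    · rw [show (fun (dd : GDict) g1 => (p ++ a :: rest).foldl (aStep g1) dd)
          = (fun (dd : GDict) g1 => ((p ++ [a]) ++ rest).foldl (aStep g1) dd) by rw [← hl]]
      exact this
    · intro c b hc hb
      rcases List.mem_append.mp hb with hbp | hba
      · rcases hp c b (List.mem_cons_of_mem a hc) hbp with hcb | hcb
        · exact Or.inl hcb
        · exact Or.inr (contains_brow a rest d (c, b) hcb)
      · have hba' : b = a := by simpa using hba
        subst hba'
        by_cases hcb : b = c
        · exact Or.inl hcb.symm
        · exact Or.inr (brow_contains_pair b c rest d hc hcb)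

-- ===== VERDICT (by name: the statement is the Claim_ definition above) =====
theorem dists_spec : Claim_equal_dists := by
  intro galaxs _
  unfold Spec_dists dists dists_alt
  have h := main_eq galaxs [] PySem.Dict.empty
    (by constructor <;> simp [PySem.Dict.keys_empty, PySem.Dict.get?_empty])
    (by intro a b _ hb; simp at hb)
  simp only [List.nil_append] at h
  rw [h]
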